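-- pv_equiv track=rewrite | github.com/Shivank-goel/rag-document-assistant | src/generator.py | trim_contexts
-- ===== SOURCE A (Python) =====
-- def trim_contexts(contexts, max_chars=1500):
--     trimmed = []
--     total_chars = 0
--
--     for ctx in contexts:
--         if total_chars + len(ctx) > max_chars:
--             break
--         trimmed.append(ctx)
--         total_chars += len(ctx)
--
--     return trimmed
-- ===== SOURCE B (Python) =====
-- def trim_contexts(contexts, max_chars=1500):
--     ctxs = list(contexts)
--     cums = []
--     t = 0
--     for c in ctxs:
--         t += len(c)
--         cums.append(t)
--     i = next((k for k, t in enumerate(cums) if t > max_chars), len(ctxs))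
--     return ctxs[:i]
-- ===== Notes on version B (the rewrite author's own statement) =====
-- stated objective: alternative
-- what changed: B builds a prefix-sum table of cumulative character counts, locates the first index whose running total exceeds max_chars, and returns a slice of the input there, instead of A's accumulate-and-break loop that appends element by element.
import Mathlib
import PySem

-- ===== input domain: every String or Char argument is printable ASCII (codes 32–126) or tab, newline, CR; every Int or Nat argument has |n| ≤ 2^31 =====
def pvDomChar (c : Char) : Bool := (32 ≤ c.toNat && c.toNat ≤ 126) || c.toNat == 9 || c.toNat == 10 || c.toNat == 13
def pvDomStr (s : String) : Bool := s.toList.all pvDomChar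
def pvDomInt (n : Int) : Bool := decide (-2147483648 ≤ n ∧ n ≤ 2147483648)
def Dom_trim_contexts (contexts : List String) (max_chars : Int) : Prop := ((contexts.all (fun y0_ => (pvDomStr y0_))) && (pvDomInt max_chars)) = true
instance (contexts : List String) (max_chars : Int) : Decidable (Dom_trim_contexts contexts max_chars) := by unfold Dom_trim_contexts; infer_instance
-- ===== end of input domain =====

-- B replaces A's accumulate-and-break loop by a prefix-sum table plus a slice at the first index exceeding max_chars (alternative decomposition, same cost).


-- ===== PORT A =====
-- loop of A: carries trimmed and total_chars, breaks when the next context would exceed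
def trimA_loop (max_chars : Int) (trimmed : List String) (total : Int) : List String → List String
  | [] => trimmed
  | c :: rest =>
    if total + (c.length : Int) > max_chars then trimmed
    else trimA_loop max_chars (trimmed ++ [c]) (total + (c.length : Int)) rest

def trim_contexts (contexts : List String) (max_chars : Int) : List String :=
  trimA_loop max_chars [] 0 contexts

-- ===== PORT B =====
-- running totals of lengths (the prefix-sum table of B)
def cumsums (t : Int) : List Int → List Int
  | [] => []
  | L :: rest => (t + L) :: cumsums (t + L) rest

def trim_contexts_alt (contexts : List String) (max_chars : Int) : List String :=
  let cums := cumsums 0 (contexts.map (fun c => (c.length : Int)))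
  let i := (cums.findIdx? (fun t => decide (t > max_chars))).getD contexts.length
  contexts.take i

-- ===== PRECONDITION & SPEC =====
def Spec_trim_contexts (contexts : List String) (max_chars : Int) (out : List String) : Prop := out = trim_contexts_alt contexts max_chars
instance (contexts : List String) (max_chars : Int) (out : List String) : Decidable (Spec_trim_contexts contexts max_chars out) := by unfold Spec_trim_contexts; infer_instance

-- ===== CLAIM (what is proved, stated in full; the proofs are below) =====
def Claim_equal_trim_contexts : Prop := ∀ (contexts : List String) (max_chars : Int), Dom_trim_contexts contexts max_chars → Spec_trim_contexts contexts max_chars (trim_contexts contexts max_chars)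

-- ===== LEMMAS AND PROOFS =====

-- ===== VERDICT (by name: the statement is the Claim_ definition above) =====
theorem trimA_loop_eq (max_chars : Int) (contexts : List String) :
    ∀ (total : Int) (trimmed : List String),
    trimA_loop max_chars trimmed total contexts =
      trimmed ++ contexts.take
        (((cumsums total (contexts.map (fun c => (c.length : Int)))).findIdx?
            (fun t => decide (t > max_chars))).getD contexts.length) := by
  induction contexts with
  | nil => intro total trimmed; simp [trimA_loop, cumsums]
  | cons c rest ih =>
    intro total trimmed
    simp only [trimA_loop, List.map_cons, cumsums, List.findIdx?_cons]
    by_cases h : total + (c.length : Int) > max_chars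
    · simp [h]
    · rw [ih]
      simp only [decide_eq_true_eq]
      rw [if_neg h]
      cases hfi : (cumsums (total + (c.length : Int)) (rest.map (fun c => (c.length : Int)))).findIdx? (fun t => decide (t > max_chars)) with
      | none => simp only [if_neg h, Option.getD_none]; simp
      | some i => simp only [if_neg h, Option.getD_some]; simp [List.take_succ_cons]

theorem trim_contexts_spec : Claim_equal_trim_contexts := by
  intro contexts max_chars _
  unfold Spec_trim_contexts trim_contexts trim_contexts_alt
  rw [trimA_loop_eq]
  simp
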